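-- pv_equiv track=rewrite | github.com/fafiyusuf/LeetCode-Solutions | Burger.py | max_hamburgers
-- ===== SOURCE A (Python) =====
-- def can_make_hamburgers(x, recipe_count, available, prices, budget):
--     needed_b = max(0, recipe_count['B'] * x - available['B'])
--     needed_s = max(0, recipe_count['S'] * x - available['S'])
--     needed_c = max(0, recipe_count['C'] * x - available['C'])
--
--     total_cost = (needed_b * prices['B']) + (needed_s * prices['S']) + (needed_c * prices['C'])
--
--     return total_cost <= budget
--
-- def max_hamburgers(recipe, available, prices, budget):
--     recipe_count = {'B': 0, 'S': 0, 'C': 0}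
--     for char in recipe:
--         recipe_count[char] += 1
--
--     low, high = 0, 10**13
--     while low < high:
--         mid = (low + high + 1) // 2
--         if can_make_hamburgers(mid, recipe_count, available, prices, budget):
--             low = mid
--         else:
--             high = mid - 1
--
--     return low
-- ===== SOURCE B (Python) =====
-- CAP = 10 ** 13
--
--
-- def _insert_desc(cuts, t):
--     # insert t into a strictly descending list, skipping duplicates
--     if not cuts or t > cuts[0]:
--         return [t] + cuts
--     if t == cuts[0]:
--         return cuts
--     return [cuts[0]] + _insert_desc(cuts[1:], t)
--
--
-- def _sweep(cuts, items, base, budget):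
--     # cuts strictly descending, ending in 0; cost is linear on each segment
--     # [cuts[1], cuts[0]-1]; scan segments from the top, return the largest
--     # feasible x, or 0 when no segment admits one.
--     if len(cuts) < 2:
--         return 0
--     hi, lo = cuts[0] - 1, cuts[1]
--     slope = sum(s for (t, s, o) in items if t <= lo)
--     inter = base - sum(o for (t, s, o) in items if t <= lo)
--     if slope == 0:
--         if inter <= budget:
--             return hi
--     else:
--         x = (budget - inter) // slope
--         if x >= lo:
--             return min(x, hi)
--     return _sweep(cuts[1:], items, base, budget)
--
--
-- def max_hamburgers(recipe, available, prices, budget):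
--     counts = {'B': 0, 'S': 0, 'C': 0}
--     for char in recipe:
--         counts[char] += 1
--     base = 0
--     items = []
--     for k in ('B', 'S', 'C'):
--         c, a, p = counts[k], available[k], prices[k]
--         if c == 0:
--             base += max(0, -a) * p
--         else:
--             items.append((max(-(-a // c), 0), c * p, a * p))
--     cuts = [CAP + 1, 0]
--     for (t, s, o) in items:
--         if t <= CAP:
--             cuts = _insert_desc(cuts, t)
--     return _sweep(cuts, items, base, budget)
-- ===== Notes on version B (the rewrite author's own statement) =====
-- stated objective: alternative
-- what changed: Replaces the 44-iteration binary search over [0,10^13] by a direct piecewise-linear solve: compute each needed ingredient's activation threshold, sort the (at most 3) thresholds descending, and on each linear cost segment solve cost(x) <= budget exactly with one floor division, scanning segments from the top.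
import Mathlib
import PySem

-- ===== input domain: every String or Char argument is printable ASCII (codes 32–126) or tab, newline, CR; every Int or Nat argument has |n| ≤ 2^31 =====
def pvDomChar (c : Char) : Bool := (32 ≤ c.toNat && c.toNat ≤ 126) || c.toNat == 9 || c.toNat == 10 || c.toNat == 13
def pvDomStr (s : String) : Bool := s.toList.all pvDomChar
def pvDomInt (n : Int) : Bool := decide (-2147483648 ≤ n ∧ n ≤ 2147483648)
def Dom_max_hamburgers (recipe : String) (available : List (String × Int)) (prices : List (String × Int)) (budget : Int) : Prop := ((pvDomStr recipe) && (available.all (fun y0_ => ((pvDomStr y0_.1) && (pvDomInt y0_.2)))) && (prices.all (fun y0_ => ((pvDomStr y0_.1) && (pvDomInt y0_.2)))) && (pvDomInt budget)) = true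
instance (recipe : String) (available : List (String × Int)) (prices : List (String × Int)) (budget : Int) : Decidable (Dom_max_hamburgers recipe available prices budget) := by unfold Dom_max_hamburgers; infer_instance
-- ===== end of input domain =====

-- B replaces A's binary search over [0,10^13] by an exact piecewise-linear segment solve (alternative algorithm, same return value on Pre_).

-- ===== PORT A =====

-- termination helper for the binary-search loop (cited by decreasing_by)
theorem pvMidBounds (low high : Int) (h : low < high) :
    low + 1 ≤ PySem.Int.floordiv (low + high + 1) 2 ∧ PySem.Int.floordiv (low + high + 1) 2 ≤ high := by
  rw [PySem.Int.floordiv_eq_ediv_of_pos (by norm_num)]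
  omega

-- can_make_hamburgers; dict lookups use getD 0: Python raises KeyError on a missing key, excluded by Pre_
def pvCanMake (x : Int) (rc av pr : PySem.Dict String Int) (budget : Int) : Bool :=
  let neededB := max 0 (rc.getD "B" 0 * x - av.getD "B" 0)
  let neededS := max 0 (rc.getD "S" 0 * x - av.getD "S" 0)
  let neededC := max 0 (rc.getD "C" 0 * x - av.getD "C" 0)
  decide (neededB * pr.getD "B" 0 + neededS * pr.getD "S" 0 + neededC * pr.getD "C" 0 ≤ budget)

-- the while low < high loop
def pvSearch (rc av pr : PySem.Dict String Int) (budget low high : Int) : Int :=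
  if h : low < high then
    let mid := PySem.Int.floordiv (low + high + 1) 2
    if pvCanMake mid rc av pr budget then pvSearch rc av pr budget mid high
    else pvSearch rc av pr budget low (mid - 1)
  else low
termination_by (high - low).toNat
decreasing_by
  · have := pvMidBounds low high h; omega
  · have := pvMidBounds low high h; omega

-- recipe_count loop: recipe_count[char] += 1 (KeyError on a char outside B/S/C: excluded by Pre_, modify's default is never read there)
def pvCount (recipe : String) : PySem.Dict String Int :=
  recipe.toList.foldl (fun d c => d.modify (String.ofList [c]) 0 (· + 1))
    (PySem.Dict.ofList [("B", 0), ("S", 0), ("C", 0)])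

def max_hamburgers (recipe : String) (available : List (String × Int)) (prices : List (String × Int)) (budget : Int) : Int :=
  pvSearch (pvCount recipe) (PySem.Dict.mk available) (PySem.Dict.mk prices) budget 0 10000000000000

-- ===== PORT B =====

-- _insert_desc: insert into a strictly descending list, skipping duplicates
def pvInsertDesc (cuts : List Int) (t : Int) : List Int :=
  match cuts with
  | [] => [t]
  | c :: rest =>
    if t > c then t :: c :: rest
    else if t = c then c :: rest
    else c :: pvInsertDesc rest t

-- _sweep: scan the linear segments [cuts[1], cuts[0]-1] from the top
def pvSweep (cuts : List Int) (items : List (Int × Int × Int)) (base budget : Int) : Int :=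
  match cuts with
  | c0 :: c1 :: rest =>
    let hi := c0 - 1
    let lo := c1
    let slope := ((items.filter (fun it => decide (it.1 ≤ lo))).map (fun it => it.2.1)).sum
    let inter := base - ((items.filter (fun it => decide (it.1 ≤ lo))).map (fun it => it.2.2)).sum
    if slope = 0 then
      if inter ≤ budget then hi else pvSweep (c1 :: rest) items base budget
    else
      let x := PySem.Int.floordiv (budget - inter) slope
      if x ≥ lo then min x hi else pvSweep (c1 :: rest) items base budget
  | _ => 0

-- Source B's counting loop is the same loop as Source A's (kept per the recipe), so B's port reuses pvCount
def max_hamburgers_alt (recipe : String) (available : List (String × Int)) (prices : List (String × Int)) (budget : Int) : Int :=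
  let counts := pvCount recipe
  let av := PySem.Dict.mk available
  let pr := PySem.Dict.mk prices
  let st := (["B", "S", "C"] : List String).foldl (fun (st : Int × List (Int × Int × Int)) k =>
    let c := counts.getD k 0
    let a := av.getD k 0
    let p := pr.getD k 0
    if c = 0 then (st.1 + max 0 (-a) * p, st.2)
    else (st.1, st.2 ++ [(max (-(PySem.Int.floordiv (-a) c)) 0, (c * p, a * p))])) (0, [])
  let cuts := st.2.foldl (fun cs it => if it.1 ≤ 10000000000000 then pvInsertDesc cs it.1 else cs)
    [10000000000001, 0]
  pvSweep cuts st.2 st.1 budget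

-- ===== PRECONDITION & SPEC =====
-- Pre_ excludes (a) inputs where A raises KeyError (a recipe char outside 'B','S','C', or a missing
-- 'B'/'S'/'C' key in available/prices), and (b) inputs where an ingredient the recipe needs has a
-- negative price: there the purchase cost is not monotone in x and the value A's binary search
-- returns is an accident of its probe points.
def Pre_max_hamburgers (recipe : String) (available : List (String × Int)) (prices : List (String × Int)) (budget : Int) : Prop :=
  (recipe.toList.all (fun c => c == 'B' || c == 'S' || c == 'C') = true) ∧
  ((PySem.Dict.mk available).contains "B" = true ∧ (PySem.Dict.mk available).contains "S" = true ∧ (PySem.Dict.mk available).contains "C" = true) ∧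
  ((PySem.Dict.mk prices).contains "B" = true ∧ (PySem.Dict.mk prices).contains "S" = true ∧ (PySem.Dict.mk prices).contains "C" = true) ∧
  (0 < recipe.toList.count 'B' → 0 ≤ (PySem.Dict.mk prices).getD "B" 0) ∧
  (0 < recipe.toList.count 'S' → 0 ≤ (PySem.Dict.mk prices).getD "S" 0) ∧
  (0 < recipe.toList.count 'C' → 0 ≤ (PySem.Dict.mk prices).getD "C" 0)
instance (recipe : String) (available : List (String × Int)) (prices : List (String × Int)) (budget : Int) : Decidable (Pre_max_hamburgers recipe available prices budget) := by unfold Pre_max_hamburgers; infer_instance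

def pvWitness_max_hamburgers : String × (List (String × Int)) × (List (String × Int)) × Int :=
  ("BS", [("B", 2), ("S", 1), ("C", 0)], [("B", 1), ("S", 1), ("C", 1)], 10)

def Spec_max_hamburgers (recipe : String) (available : List (String × Int)) (prices : List (String × Int)) (budget : Int) (out : Int) : Prop := out = max_hamburgers_alt recipe available prices budget
instance (recipe : String) (available : List (String × Int)) (prices : List (String × Int)) (budget : Int) (out : Int) : Decidable (Spec_max_hamburgers recipe available prices budget out) := by unfold Spec_max_hamburgers; infer_instance

-- ===== CLAIM (what is proved, stated in full; the proofs are below) =====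
def Claim_equal_max_hamburgers : Prop := ∀ (recipe : String) (available : List (String × Int)) (prices : List (String × Int)) (budget : Int), Dom_max_hamburgers recipe available prices budget → Pre_max_hamburgers recipe available prices budget → Spec_max_hamburgers recipe available prices budget (max_hamburgers recipe available prices budget)

-- ===== LEMMAS AND PROOFS =====

-- the search cap 10**13
def pvN : Int := 10000000000000

-- cost of making x burgers, expressed through B's (threshold, slope, offset) items and constant base
def pvICost (items : List (Int × Int × Int)) (base x : Int) : Int :=
  base + (items.map (fun it => if it.1 ≤ x then it.2.1 * x - it.2.2 else 0)).sum

-- well-formedness of an item produced under Pre_: nonnegative threshold and slope, offset below slope*threshold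
def pvGood (it : Int × Int × Int) : Prop := 0 ≤ it.1 ∧ 0 ≤ it.2.1 ∧ it.2.2 ≤ it.2.1 * it.1

-- the (unique) value both programs must return
def pvSat (items : List (Int × Int × Int)) (base budget r : Int) : Prop :=
  0 ≤ r ∧ r ≤ pvN ∧ (pvICost items base r ≤ budget ∨ r = 0) ∧
  ∀ y, r < y → y ≤ pvN → ¬(pvICost items base y ≤ budget)

theorem pvSat_le (items : List (Int × Int × Int)) (base budget r r' : Int)
    (h : pvSat items base budget r) (h' : pvSat items base budget r') : r ≤ r' := by
  by_contra hlt
  push_neg at hlt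
  have hy := h'.2.2.2 r hlt h.2.1
  rcases h.2.2.1 with hc | h0
  · exact hy hc
  · have := h'.1; omega

theorem pvSat_unique (items : List (Int × Int × Int)) (base budget r r' : Int)
    (h : pvSat items base budget r) (h' : pvSat items base budget r') : r = r' :=
  le_antisymm (pvSat_le items base budget r r' h h') (pvSat_le items base budget r' r h' h)

theorem pvICost_mono (items : List (Int × Int × Int)) (base : Int)
    (hgood : ∀ it ∈ items, pvGood it) (x y : Int) (hx : 0 ≤ x) (hxy : x ≤ y) :
    pvICost items base x ≤ pvICost items base y := by
  induction items with
  | nil => simp [pvICost]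
  | cons it its ih =>
    have hg := hgood it (by simp)
    have ih' := ih (fun a ha => hgood a (by simp [ha]))
    simp only [pvICost, List.map_cons, List.sum_cons] at *
    have hterm : (if it.1 ≤ x then it.2.1 * x - it.2.2 else 0) ≤
        (if it.1 ≤ y then it.2.1 * y - it.2.2 else 0) := by
      rcases hg with ⟨ht, hs, ho⟩
      split_ifs with h1 h2 h2
      · have := mul_le_mul_of_nonneg_left hxy hs; omega
      · omega
      · have h3 : it.2.1 * it.1 ≤ it.2.1 * y := mul_le_mul_of_nonneg_left h2 hs
        omega
      · omega
    omega

theorem pvICost_linear (items : List (Int × Int × Int)) (base lo hi y : Int)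
    (hy1 : lo ≤ y) (hy2 : y ≤ hi)
    (hsep : ∀ it ∈ items, it.1 ≤ lo ∨ hi < it.1) :
    pvICost items base y =
      (base - ((items.filter (fun it => decide (it.1 ≤ lo))).map (fun it => it.2.2)).sum)
        + ((items.filter (fun it => decide (it.1 ≤ lo))).map (fun it => it.2.1)).sum * y := by
  induction items with
  | nil => simp [pvICost]
  | cons it its ih =>
    have ih' := ih (fun a ha => hsep a (by simp [ha]))
    rcases hsep it (by simp) with hle | hgt
    · have hley : it.1 ≤ y := le_trans hle hy1
      simp only [pvICost] at ih' ⊢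
      rw [List.map_cons, List.sum_cons, if_pos hley,
        List.filter_cons_of_pos (by simpa using hle), List.map_cons, List.map_cons,
        List.sum_cons, List.sum_cons, add_mul]
      linarith [ih']
    · have hnle : ¬ it.1 ≤ lo := by omega
      have hny : ¬ it.1 ≤ y := by omega
      simp only [pvICost] at ih' ⊢
      rw [List.map_cons, List.sum_cons, if_neg hny,
        List.filter_cons_of_neg (by simpa using hnle), zero_add]
      exact ih'

theorem pvSlope_nonneg (items : List (Int × Int × Int)) (lo : Int)
    (hgood : ∀ it ∈ items, pvGood it) :
    0 ≤ ((items.filter (fun it => decide (it.1 ≤ lo))).map (fun it => it.2.1)).sum := by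
  apply List.sum_nonneg
  intro a ha
  simp only [List.mem_map, List.mem_filter] at ha
  obtain ⟨it, ⟨hmem, _⟩, rfl⟩ := ha
  exact (hgood it hmem).2.1

theorem mem_pvInsertDesc (cuts : List Int) (t x : Int) :
    x ∈ pvInsertDesc cuts t ↔ x = t ∨ x ∈ cuts := by
  induction cuts with
  | nil => simp [pvInsertDesc]
  | cons c rest ih =>
    simp only [pvInsertDesc]
    split_ifs with h1 h2
    · simp [List.mem_cons]
    · subst h2; simp [List.mem_cons]
    · simp [List.mem_cons, ih]; tauto

theorem chain_pvInsertDesc (cuts : List Int) (t : Int)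
    (h : List.IsChain (· > ·) cuts) : List.IsChain (· > ·) (pvInsertDesc cuts t) := by
  induction cuts with
  | nil => simp [pvInsertDesc]
  | cons c rest ih =>
    simp only [pvInsertDesc]
    split_ifs with h1 h2
    · exact List.isChain_cons_cons.mpr ⟨h1, h⟩
    · exact h
    · rcases List.isChain_cons.mp h with ⟨hhd, htl⟩
      refine List.isChain_cons.mpr ⟨?_, ih htl⟩
      intro b hb
      rcases rest with _ | ⟨r, rs⟩
      · simp [pvInsertDesc] at hb; omega
      · simp only [pvInsertDesc] at hb
        split_ifs at hb with g1 g2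
        · simp at hb; omega
        · simp at hb; subst hb; exact hhd r rfl
        · simp at hb; subst hb; exact hhd r rfl

theorem pvSweep_sat (items : List (Int × Int × Int)) (base budget : Int)
    (hgood : ∀ it ∈ items, pvGood it) :
    ∀ (tl : List Int) (c0 : Int),
      List.IsChain (· > ·) (c0 :: tl) →
      (0:Int) ∈ (c0 :: tl) →
      (∀ c ∈ (c0 :: tl), 0 ≤ c ∧ c ≤ pvN + 1) →
      (∀ it ∈ items, it.1 ∈ (c0 :: tl) ∨ c0 - 1 < it.1) →
      (∀ y, c0 - 1 < y → y ≤ pvN → ¬(pvICost items base y ≤ budget)) →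
      pvSat items base budget (pvSweep (c0 :: tl) items base budget) := by
  intro tl
  induction tl with
  | nil =>
    intro c0 _ hmem hbnd _ h5
    have hc0 : (0:Int) = c0 := by simpa using hmem
    subst hc0
    rw [show pvSweep [(0:Int)] items base budget = 0 from rfl]
    exact ⟨le_refl 0, by norm_num [pvN], Or.inr rfl, fun y hy hyN => h5 y (by omega) hyN⟩
  | cons c1 rest ih =>
    intro c0 hch hmem hbnd hsep h5
    have hc01 : c0 > c1 := (List.isChain_cons_cons.mp hch).1
    have hchtl : List.IsChain (· > ·) (c1 :: rest) := (List.isChain_cons_cons.mp hch).2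
    have hc1nn : (0:Int) ≤ c1 := (hbnd c1 (by simp)).1
    have hc0le : c0 ≤ pvN + 1 := (hbnd c0 (by simp)).2
    have htail_le : ∀ x ∈ c1 :: rest, x ≤ c1 := by
      intro x hx
      rcases List.mem_cons.mp hx with rfl | hx'
      · exact le_refl x
      · exact le_of_lt (List.rel_of_pairwise_cons hchtl.pairwise hx')
    have hseg : ∀ it ∈ items, it.1 ≤ c1 ∨ c0 - 1 < it.1 := by
      intro it hit
      rcases hsep it hit with hin | hgt
      · rcases List.mem_cons.mp hin with heq | hin'
        · right; omega
        · left; exact htail_le _ hin'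
      · right; exact hgt
    have hmem' : (0:Int) ∈ c1 :: rest := by
      rcases List.mem_cons.mp hmem with h0 | h0
      · exfalso; omega
      · exact h0
    have hbnd' : ∀ c ∈ c1 :: rest, 0 ≤ c ∧ c ≤ pvN + 1 := fun c hc => hbnd c (by simp [hc])
    have hsep' : ∀ it ∈ items, it.1 ∈ c1 :: rest ∨ c1 - 1 < it.1 := by
      intro it hit
      rcases hsep it hit with hin | hgt
      · rcases List.mem_cons.mp hin with heq | hin'
        · right; omega
        · left; exact hin'
      · right; omega
    rw [pvSweep]
    simp only [ge_iff_le]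
    set slope := ((items.filter (fun it => decide (it.1 ≤ c1))).map (fun it => it.2.1)).sum with hslope
    set inter := base - ((items.filter (fun it => decide (it.1 ≤ c1))).map (fun it => it.2.2)).sum with hinter
    have hlin : ∀ y, c1 ≤ y → y ≤ c0 - 1 → pvICost items base y = inter + slope * y :=
      fun y hy1 hy2 => pvICost_linear items base c1 (c0-1) y hy1 hy2 hseg
    have hsl : 0 ≤ slope := pvSlope_nonneg items c1 hgood
    split_ifs with hs0 hib hxc
    · -- slope = 0, inter ≤ budget: return c0 - 1
      refine ⟨by omega, by omega, Or.inl ?_, ?_⟩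
      · rw [hlin (c0-1) (by omega) (by omega), hs0]; omega
      · intro y hy hyN; exact h5 y (by omega) hyN
    · -- slope = 0, inter > budget: recurse
      apply ih c1 hchtl hmem' hbnd' hsep'
      intro y hy hyN
      by_cases hyc : y ≤ c0 - 1
      · rw [hlin y (by omega) hyc, hs0]; omega
      · exact h5 y (by omega) hyN
    · -- slope > 0, x ≥ c1: return min x (c0-1)
      have hslpos : 0 < slope := lt_of_le_of_ne hsl (Ne.symm hs0)
      have hbr : ∀ q : Int, q ≤ PySem.Int.floordiv (budget - inter) slope ↔ q * slope ≤ budget - inter :=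
        fun q => PySem.Int.le_floordiv_iff_mul_le hslpos
      set x := PySem.Int.floordiv (budget - inter) slope with hx
      refine ⟨by omega, by omega, Or.inl ?_, ?_⟩
      · rw [hlin (min x (c0-1)) (by omega) (by omega)]
        have h1 : min x (c0-1) * slope ≤ budget - inter := by
          have := (hbr (min x (c0-1))).mp (by omega)
          exact this
        linarith [mul_comm (min x (c0-1)) slope]
      · intro y hy hyN
        by_cases hyc : y ≤ c0 - 1
        · rw [hlin y (by omega) hyc]
          intro hP
          have hyx : y ≤ x := (hbr y).mpr (by linarith [mul_comm slope y])
          omega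
        · exact h5 y (by omega) hyN
    · -- slope > 0, x < c1: recurse
      have hslpos : 0 < slope := lt_of_le_of_ne hsl (Ne.symm hs0)
      have hbr : ∀ q : Int, q ≤ PySem.Int.floordiv (budget - inter) slope ↔ q * slope ≤ budget - inter :=
        fun q => PySem.Int.le_floordiv_iff_mul_le hslpos
      set x := PySem.Int.floordiv (budget - inter) slope with hx
      apply ih c1 hchtl hmem' hbnd' hsep'
      intro y hy hyN
      by_cases hyc : y ≤ c0 - 1
      · rw [hlin y (by omega) hyc]
        intro hP
        have hyx : y ≤ x := (hbr y).mpr (by linarith [mul_comm slope y])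
        omega
      · exact h5 y (by omega) hyN

theorem pvCutsFold (items : List (Int × Int × Int)) :
    ∀ cs0 : List Int, List.IsChain (· > ·) cs0 →
      List.IsChain (· > ·) (items.foldl (fun cs it => if it.1 ≤ 10000000000000 then pvInsertDesc cs it.1 else cs) cs0) ∧
      (∀ x : Int, x ∈ items.foldl (fun cs it => if it.1 ≤ 10000000000000 then pvInsertDesc cs it.1 else cs) cs0 ↔
        x ∈ cs0 ∨ ∃ it ∈ items, x = it.1 ∧ it.1 ≤ 10000000000000) := by
  induction items with
  | nil => intro cs0 h; exact ⟨h, fun x => by simp⟩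
  | cons it its ih =>
    intro cs0 h
    simp only [List.foldl_cons]
    by_cases hle : it.1 ≤ (10000000000000:Int)
    · rw [if_pos hle]
      obtain ⟨hch, hmem⟩ := ih (pvInsertDesc cs0 it.1) (chain_pvInsertDesc cs0 it.1 h)
      refine ⟨hch, fun x => ?_⟩
      rw [hmem x, mem_pvInsertDesc]
      constructor
      · rintro ((rfl | hx) | ⟨a, ha, rfl, hA⟩)
        · exact Or.inr ⟨it, by simp, rfl, hle⟩
        · exact Or.inl hx
        · exact Or.inr ⟨a, by simp [ha], rfl, hA⟩
      · rintro (hx | ⟨a, ha, rfl, hA⟩)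
        · exact Or.inl (Or.inr hx)
        · rcases List.mem_cons.mp ha with rfl | ha'
          · exact Or.inl (Or.inl rfl)
          · exact Or.inr ⟨a, ha', rfl, hA⟩
    · rw [if_neg hle]
      obtain ⟨hch, hmem⟩ := ih cs0 h
      refine ⟨hch, fun x => ?_⟩
      rw [hmem x]
      constructor
      · rintro (hx | ⟨a, ha, rfl, hA⟩)
        · exact Or.inl hx
        · exact Or.inr ⟨a, by simp [ha], rfl, hA⟩
      · rintro (hx | ⟨a, ha, rfl, hA⟩)
        · exact Or.inl hx
        · rcases List.mem_cons.mp ha with rfl | ha'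
          · exact absurd hA hle
          · exact Or.inr ⟨a, ha', rfl, hA⟩

theorem pvD0_getD (st : String) :
    (PySem.Dict.ofList [("B",(0:Int)),("S",(0:Int)),("C",(0:Int))]).getD st 0 = 0 := by
  rw [PySem.Dict.getD_eq_get?_getD,
    show PySem.Dict.ofList [("B",(0:Int)),("S",(0:Int)),("C",(0:Int))] =
      PySem.Dict.mk [("B",(0:Int)),("S",(0:Int)),("C",(0:Int))] by decide]
  rw [PySem.Dict.get?_mk_cons, PySem.Dict.get?_mk_cons, PySem.Dict.get?_mk_cons]
  split_ifs <;> simp [PySem.Dict.get?]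

theorem pvMkInj : Function.Injective (fun c : Char => String.ofList [c]) := by
  intro a b h
  have h2 := congrArg String.toList h
  rw [String.toList_ofList, String.toList_ofList] at h2
  simpa using h2

theorem pvCount_getD (recipe : String) (k : Char) :
    (pvCount recipe).getD (String.ofList [k]) 0 = (recipe.toList.count k : Int) := by
  unfold pvCount
  have e : List.foldl (fun d c => d.modify (String.ofList [c]) 0 (· + 1))
        (PySem.Dict.ofList [("B",(0:Int)),("S",(0:Int)),("C",(0:Int))]) recipe.toList
      = List.foldl (fun d (st : String) => d.modify st 0 (· + 1))
        (PySem.Dict.ofList [("B",(0:Int)),("S",(0:Int)),("C",(0:Int))])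
        (recipe.toList.map (fun c => String.ofList [c])) := (List.foldl_map (f := fun c : Char => String.ofList [c]) (g := fun (d : PySem.Dict String Int) (st : String) => d.modify st 0 (· + 1))).symm
  rw [e, PySem.Dict.getD_foldl_modify_add_one, pvD0_getD,
    List.count_map_of_injective _ _ pvMkInj k]
  simp

theorem pvCeil_le_iff (a c x : Int) (hc : 0 < c) (hx : 0 ≤ x) :
    (max (-(PySem.Int.floordiv (-a) c)) 0 ≤ x) ↔ a ≤ c * x := by
  have h1 : ∀ q : Int, (q ≤ PySem.Int.floordiv (-a) c) ↔ q * c ≤ -a :=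
    fun q => PySem.Int.le_floordiv_iff_mul_le hc
  rw [max_le_iff]
  constructor
  · rintro ⟨h, -⟩
    have h2 := (h1 (-x)).mp (by omega)
    have e : (-x) * c = -(c * x) := by ring
    omega
  · intro h
    refine ⟨?_, hx⟩
    have h2 : (-x) * c ≤ -a := by
      have e : (-x) * c = -(c * x) := by ring
      omega
    have := (h1 (-x)).mpr h2
    omega

theorem pvCeil_mul_ge (a c : Int) (hc : 0 < c) :
    a ≤ c * max (-(PySem.Int.floordiv (-a) c)) 0 :=
  (pvCeil_le_iff a c (max (-(PySem.Int.floordiv (-a) c)) 0) hc (le_max_right _ _)).mp le_rfl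

theorem pvTerm_pos (c a p x : Int) (hc : 0 < c) (hx : 0 ≤ x) :
    max 0 (c * x - a) * p =
      (if max (-(PySem.Int.floordiv (-a) c)) 0 ≤ x then c * p * x - a * p else 0) := by
  by_cases h : max (-(PySem.Int.floordiv (-a) c)) 0 ≤ x
  · rw [if_pos h]
    have ha : a ≤ c * x := (pvCeil_le_iff a c x hc hx).mp h
    rw [max_eq_right (by omega : (0:Int) ≤ c * x - a)]
    ring
  · rw [if_neg h]
    have ha : ¬ a ≤ c * x := fun hh => h ((pvCeil_le_iff a c x hc hx).mpr hh)
    rw [max_eq_left (by omega : c * x - a ≤ (0:Int))]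
    ring

theorem pvICost_append_single (l : List (Int × Int × Int)) (it : Int × Int × Int) (b x : Int) :
    pvICost (l ++ [it]) b x = pvICost l b x + (if it.1 ≤ x then it.2.1 * x - it.2.2 else 0) := by
  simp [pvICost, List.map_append, List.sum_append]
  ring

-- the per-key step of B's item/base construction (definitionally the lambda inside max_hamburgers_alt)
def pvStepF (counts av pr : PySem.Dict String Int) (st : Int × List (Int × Int × Int)) (k : String) :
    Int × List (Int × Int × Int) :=
  let c := counts.getD k 0
  let a := av.getD k 0
  let p := pr.getD k 0
  if c = 0 then (st.1 + max 0 (-a) * p, st.2)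
  else (st.1, st.2 ++ [(max (-(PySem.Int.floordiv (-a) c)) 0, (c * p, a * p))])

def pvParts (recipe : String) (available prices : List (String × Int)) :
    Int × List (Int × Int × Int) :=
  List.foldl (pvStepF (pvCount recipe) (PySem.Dict.mk available) (PySem.Dict.mk prices))
    (0, []) ["B", "S", "C"]

theorem pvStep_snd_good (counts av pr : PySem.Dict String Int) (st : Int × List (Int × Int × Int)) (k : String)
    (hgood : ∀ it ∈ st.2, pvGood it)
    (hcnn : 0 ≤ counts.getD k 0)
    (hp : counts.getD k 0 ≠ 0 → 0 ≤ pr.getD k 0) :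
    ∀ it ∈ (pvStepF counts av pr st k).2, pvGood it := by
  unfold pvStepF
  by_cases hc : counts.getD k 0 = 0
  · rw [if_pos hc]; exact hgood
  · rw [if_neg hc]
    intro it hit
    rcases List.mem_append.mp hit with hold | hnew
    · exact hgood it hold
    · have heq : it = (max (-(PySem.Int.floordiv (-(av.getD k 0)) (counts.getD k 0))) 0,
        (counts.getD k 0 * pr.getD k 0, av.getD k 0 * pr.getD k 0)) := by simpa using hnew
      subst heq
      have hcpos : 0 < counts.getD k 0 := lt_of_le_of_ne hcnn (Ne.symm hc)
      have hpnn : 0 ≤ pr.getD k 0 := hp hc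
      refine ⟨le_max_right _ _, mul_nonneg hcnn hpnn, ?_⟩
      have h1 := pvCeil_mul_ge (av.getD k 0) (counts.getD k 0) hcpos
      calc av.getD k 0 * pr.getD k 0
          ≤ (counts.getD k 0 * max (-(PySem.Int.floordiv (-(av.getD k 0)) (counts.getD k 0))) 0) * pr.getD k 0 :=
            mul_le_mul_of_nonneg_right h1 hpnn
        _ = counts.getD k 0 * pr.getD k 0 * max (-(PySem.Int.floordiv (-(av.getD k 0)) (counts.getD k 0))) 0 := by ring

theorem pvStep_cost (counts av pr : PySem.Dict String Int) (st : Int × List (Int × Int × Int)) (k : String)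
    (x : Int) (hx : 0 ≤ x) (hcnn : 0 ≤ counts.getD k 0) :
    pvICost (pvStepF counts av pr st k).2 (pvStepF counts av pr st k).1 x =
      pvICost st.2 st.1 x + max 0 (counts.getD k 0 * x - av.getD k 0) * pr.getD k 0 := by
  unfold pvStepF
  by_cases hc : counts.getD k 0 = 0
  · rw [if_pos hc, hc]
    simp [pvICost]
    ring
  · rw [if_neg hc]
    have hcpos : 0 < counts.getD k 0 := lt_of_le_of_ne hcnn (Ne.symm hc)
    rw [pvTerm_pos (counts.getD k 0) (av.getD k 0) (pr.getD k 0) x hcpos hx]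
    exact pvICost_append_single st.2 _ st.1 x

theorem pvSearch_sat (rc av pr : PySem.Dict String Int) (budget : Int)
    (hmono : ∀ x y : Int, 0 ≤ x → x ≤ y → pvCanMake y rc av pr budget = true → pvCanMake x rc av pr budget = true) :
    ∀ (n : Nat) (low high : Int), (high - low).toNat = n → 0 ≤ low → low ≤ high → high ≤ pvN →
      (pvCanMake low rc av pr budget = true ∨ low = 0) →
      (∀ y, high < y → y ≤ pvN → ¬ pvCanMake y rc av pr budget = true) →
      (0 ≤ pvSearch rc av pr budget low high ∧ pvSearch rc av pr budget low high ≤ pvN ∧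
       (pvCanMake (pvSearch rc av pr budget low high) rc av pr budget = true ∨ pvSearch rc av pr budget low high = 0) ∧
       ∀ y, pvSearch rc av pr budget low high < y → y ≤ pvN → ¬ pvCanMake y rc av pr budget = true) := by
  intro n
  induction n using Nat.strong_induction_on with
  | _ n ih =>
    intro low high hn h0 hlh hhN hlowP hhigh
    by_cases h : low < high
    · have hmb := pvMidBounds low high h
      rw [pvSearch, dif_pos h]
      simp only []
      by_cases hcm : pvCanMake (PySem.Int.floordiv (low + high + 1) 2) rc av pr budget = true
      · rw [if_pos hcm]
        exact ih ((high - PySem.Int.floordiv (low + high + 1) 2).toNat) (by omega)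
          (PySem.Int.floordiv (low + high + 1) 2) high rfl (by omega) (by omega) hhN (Or.inl hcm) hhigh
      · rw [if_neg hcm]
        apply ih ((PySem.Int.floordiv (low + high + 1) 2 - 1 - low).toNat) (by omega)
          low (PySem.Int.floordiv (low + high + 1) 2 - 1) rfl h0 (by omega) (by omega) hlowP
        intro y hy hyN
        by_cases hyh : y ≤ high
        · intro hcy
          exact hcm (hmono (PySem.Int.floordiv (low + high + 1) 2) y (by omega) (by omega) hcy)
        · exact hhigh y (by omega) hyN
    · rw [pvSearch, dif_neg h]
      exact ⟨h0, by omega, hlowP, fun y hy hyN => hhigh y (by omega) hyN⟩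

-- ===== VERDICT (by name: the statement is the Claim_ definition above) =====
theorem max_hamburgers_spec : Claim_equal_max_hamburgers := by
  intro recipe available prices budget _ hpre
  obtain ⟨hchars, ⟨haB, haS, haC⟩, ⟨hpB, hpS, hpC⟩, hqB, hqS, hqC⟩ := hpre
  unfold Spec_max_hamburgers
  have ekB : ("B" : String) = String.ofList ['B'] := by decide
  have ekS : ("S" : String) = String.ofList ['S'] := by decide
  have ekC : ("C" : String) = String.ofList ['C'] := by decide
  have eB : (pvCount recipe).getD "B" 0 = (recipe.toList.count 'B' : Int) := by
    rw [ekB]; exact pvCount_getD recipe 'B'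
  have eS : (pvCount recipe).getD "S" 0 = (recipe.toList.count 'S' : Int) := by
    rw [ekS]; exact pvCount_getD recipe 'S'
  have eC : (pvCount recipe).getD "C" 0 = (recipe.toList.count 'C' : Int) := by
    rw [ekC]; exact pvCount_getD recipe 'C'
  have hcnnB : 0 ≤ (pvCount recipe).getD "B" 0 := by rw [eB]; exact Int.natCast_nonneg _
  have hcnnS : 0 ≤ (pvCount recipe).getD "S" 0 := by rw [eS]; exact Int.natCast_nonneg _
  have hcnnC : 0 ≤ (pvCount recipe).getD "C" 0 := by rw [eC]; exact Int.natCast_nonneg _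
  have hprB : (pvCount recipe).getD "B" 0 ≠ 0 → 0 ≤ (PySem.Dict.mk prices).getD "B" 0 := by
    intro h; apply hqB; rw [eB] at h; omega
  have hprS : (pvCount recipe).getD "S" 0 ≠ 0 → 0 ≤ (PySem.Dict.mk prices).getD "S" 0 := by
    intro h; apply hqS; rw [eS] at h; omega
  have hprC : (pvCount recipe).getD "C" 0 ≠ 0 → 0 ≤ (PySem.Dict.mk prices).getD "C" 0 := by
    intro h; apply hqC; rw [eC] at h; omega
  have hPdef : pvParts recipe available prices =
      pvStepF (pvCount recipe) (PySem.Dict.mk available) (PySem.Dict.mk prices)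
        (pvStepF (pvCount recipe) (PySem.Dict.mk available) (PySem.Dict.mk prices)
          (pvStepF (pvCount recipe) (PySem.Dict.mk available) (PySem.Dict.mk prices) (0, []) "B") "S") "C" := rfl
  have g1 := pvStep_snd_good (pvCount recipe) (PySem.Dict.mk available) (PySem.Dict.mk prices)
    (0, []) "B" (by simp) hcnnB hprB
  have g2 := pvStep_snd_good (pvCount recipe) (PySem.Dict.mk available) (PySem.Dict.mk prices)
    _ "S" g1 hcnnS hprS
  have g3 := pvStep_snd_good (pvCount recipe) (PySem.Dict.mk available) (PySem.Dict.mk prices)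
    _ "C" g2 hcnnC hprC
  have hgood : ∀ it ∈ (pvParts recipe available prices).2, pvGood it := by rw [hPdef]; exact g3
  have hcost : ∀ x : Int, 0 ≤ x → pvICost (pvParts recipe available prices).2 (pvParts recipe available prices).1 x =
      max 0 ((pvCount recipe).getD "B" 0 * x - (PySem.Dict.mk available).getD "B" 0) * (PySem.Dict.mk prices).getD "B" 0
      + max 0 ((pvCount recipe).getD "S" 0 * x - (PySem.Dict.mk available).getD "S" 0) * (PySem.Dict.mk prices).getD "S" 0
      + max 0 ((pvCount recipe).getD "C" 0 * x - (PySem.Dict.mk available).getD "C" 0) * (PySem.Dict.mk prices).getD "C" 0 := by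
    intro x hx
    rw [hPdef, pvStep_cost _ _ _ _ "C" x hx hcnnC, pvStep_cost _ _ _ _ "S" x hx hcnnS,
      pvStep_cost _ _ _ _ "B" x hx hcnnB]
    simp only [pvICost, List.map_nil, List.sum_nil, add_zero]
    ring
  have hcm : ∀ x : Int, 0 ≤ x →
      (pvCanMake x (pvCount recipe) (PySem.Dict.mk available) (PySem.Dict.mk prices) budget = true ↔
        pvICost (pvParts recipe available prices).2 (pvParts recipe available prices).1 x ≤ budget) := by
    intro x hx
    rw [hcost x hx]
    simp only [pvCanMake, decide_eq_true_eq]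
  have hmono : ∀ x y : Int, 0 ≤ x → x ≤ y →
      pvCanMake y (pvCount recipe) (PySem.Dict.mk available) (PySem.Dict.mk prices) budget = true →
      pvCanMake x (pvCount recipe) (PySem.Dict.mk available) (PySem.Dict.mk prices) budget = true := by
    intro x y hx hxy hy
    exact (hcm x hx).mpr (le_trans
      (pvICost_mono (pvParts recipe available prices).2 (pvParts recipe available prices).1 hgood x y hx hxy)
      ((hcm y (le_trans hx hxy)).mp hy))
  have hA := pvSearch_sat (pvCount recipe) (PySem.Dict.mk available) (PySem.Dict.mk prices) budget hmono
    ((pvN - 0).toNat) 0 pvN rfl le_rfl (by norm_num [pvN]) le_rfl (Or.inr rfl)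
    (fun y hy hyN => by intro _; omega)
  have hAsat : pvSat (pvParts recipe available prices).2 (pvParts recipe available prices).1 budget
      (max_hamburgers recipe available prices budget) := by
    have hAeq : max_hamburgers recipe available prices budget =
        pvSearch (pvCount recipe) (PySem.Dict.mk available) (PySem.Dict.mk prices) budget 0 pvN := rfl
    rw [hAeq]
    obtain ⟨s1, s2, s3, s4⟩ := hA
    refine ⟨s1, s2, ?_, ?_⟩
    · rcases s3 with hc | h0
      · exact Or.inl ((hcm _ s1).mp hc)
      · exact Or.inr h0
    · intro y hy hyN hPy
      exact s4 y hy hyN ((hcm y (by omega)).mpr hPy)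
  obtain ⟨hchain, hmemiff⟩ := pvCutsFold (pvParts recipe available prices).2 [10000000000001, 0]
    (List.isChain_cons_cons.mpr ⟨by norm_num, by simp⟩)
  have hbnds : ∀ c ∈ (pvParts recipe available prices).2.foldl
      (fun cs it => if it.1 ≤ 10000000000000 then pvInsertDesc cs it.1 else cs) [10000000000001, 0],
      0 ≤ c ∧ c ≤ pvN + 1 := by
    intro c hc
    rcases (hmemiff c).mp hc with hc0 | ⟨it, hit, rfl, hle⟩
    · simp at hc0
      rcases hc0 with rfl | rfl <;> norm_num [pvN]
    · refine ⟨(hgood it hit).1, ?_⟩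
      simp only [pvN]; omega
  have hN1 : ((10000000000001:Int)) ∈ (pvParts recipe available prices).2.foldl
      (fun cs it => if it.1 ≤ 10000000000000 then pvInsertDesc cs it.1 else cs) [10000000000001, 0] :=
    (hmemiff _).mpr (Or.inl (by simp))
  have h0m : ((0:Int)) ∈ (pvParts recipe available prices).2.foldl
      (fun cs it => if it.1 ≤ 10000000000000 then pvInsertDesc cs it.1 else cs) [10000000000001, 0] :=
    (hmemiff _).mpr (Or.inl (by simp))
  obtain ⟨c0, tl, hcuts⟩ : ∃ c0 tl, (pvParts recipe available prices).2.foldl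
      (fun cs it => if it.1 ≤ 10000000000000 then pvInsertDesc cs it.1 else cs) [10000000000001, 0] = c0 :: tl := by
    rcases hcc : (pvParts recipe available prices).2.foldl
      (fun cs it => if it.1 ≤ 10000000000000 then pvInsertDesc cs it.1 else cs) [10000000000001, 0] with _ | ⟨a, b⟩
    · rw [hcc] at hN1; simp at hN1
    · exact ⟨a, b, hcc⟩
  have hc0 : c0 = 10000000000001 := by
    have hpw := (hcuts ▸ hchain).pairwise
    rcases List.mem_cons.mp (hcuts ▸ hN1) with h | h
    · omega
    · have h1 := List.rel_of_pairwise_cons hpw h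
      have h2 := (hbnds c0 (by rw [hcuts]; simp)).2
      simp only [pvN] at h2
      omega
  have hsat2 := pvSweep_sat (pvParts recipe available prices).2 (pvParts recipe available prices).1 budget hgood
    tl c0 (hcuts ▸ hchain) (hcuts ▸ h0m) (fun c hc => hbnds c (hcuts ▸ hc))
    (by
      intro it hit
      by_cases hle : it.1 ≤ (10000000000000:Int)
      · left; rw [← hcuts]; exact (hmemiff it.1).mpr (Or.inr ⟨it, hit, rfl, hle⟩)
      · right; omega)
    (by
      intro y h1 h2
      exfalso
      simp only [pvN] at h2
      omega)
  have hBsat : pvSat (pvParts recipe available prices).2 (pvParts recipe available prices).1 budget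
      (max_hamburgers_alt recipe available prices budget) := by
    have hBeq : max_hamburgers_alt recipe available prices budget =
        pvSweep ((pvParts recipe available prices).2.foldl
          (fun cs it => if it.1 ≤ 10000000000000 then pvInsertDesc cs it.1 else cs) [10000000000001, 0])
          (pvParts recipe available prices).2 (pvParts recipe available prices).1 budget := rfl
    rw [hBeq, hcuts]
    exact hsat2
  exact pvSat_unique _ _ _ _ _ hAsat hBsat
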